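-- pv_equiv track=rewrite | github.com/christianebacani/Roadmap | Coding Challenges using Python and SQL/Code Wars Python Solved Problems/6 Kyu/find_the_mine.py | mine_location
-- ===== SOURCE A (Python) =====
-- def mine_location(field: list[list[int]]) -> list[int]:
--     answer = []
--
--     for i in range(len(field)):
--         if 1 not in field[i]:
--             continue
--
--         column_pos_of_mine = field[i].index(1)
--         answer.append(i)
--         answer.append(column_pos_of_mine)
--         break
--
--     return answer
-- ===== SOURCE B (Python) =====
-- def mine_location(field: list[list[int]]) -> list[int]:
--     flat = [v for row in field for v in row]
--     try:
--         idx = flat.index(1)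
--     except ValueError:
--         return []
--     r = 0
--     while idx >= len(field[r]):
--         idx -= len(field[r])
--         r += 1
--     return [r, idx]
-- ===== Notes on version B (the rewrite author's own statement) =====
-- stated objective: alternative
-- what changed: B flattens the grid once, locates the mine with a single .index(1) on the flat list, and recovers [row, col] arithmetically by subtracting row lengths from the flat index, instead of A's per-row membership-then-index search.
import Mathlib
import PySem

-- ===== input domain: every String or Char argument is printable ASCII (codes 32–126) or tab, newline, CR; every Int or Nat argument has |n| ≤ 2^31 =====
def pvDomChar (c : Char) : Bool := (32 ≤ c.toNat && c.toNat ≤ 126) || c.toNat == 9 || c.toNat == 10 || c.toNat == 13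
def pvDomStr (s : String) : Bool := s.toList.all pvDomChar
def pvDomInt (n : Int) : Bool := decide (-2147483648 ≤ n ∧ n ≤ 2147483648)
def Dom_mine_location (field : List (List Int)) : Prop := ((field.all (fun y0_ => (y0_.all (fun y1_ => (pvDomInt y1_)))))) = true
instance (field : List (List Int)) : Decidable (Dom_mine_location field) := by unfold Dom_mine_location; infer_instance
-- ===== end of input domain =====

-- B flattens the grid once, finds the first 1 with a single index search on the
-- flat list, and recovers [row, col] by subtracting row lengths from that flat
-- index (alternative decomposition; same cost).


-- ===== PORT A =====
-- the 'for i in range(len(field))' loop with its continue/break, as structural recursion carrying i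
def mineGoA : List (List Int) → Int → List Int
  | [], _ => []
  | r :: rest, i =>
    if (1 : Int) ∈ r then
      match PySem.List.index? r (1 : Int) with
      | some j => [i, (j : Int)]
      | none => []          -- unreachable: 1 ∈ r
    else mineGoA rest (i + 1)

def mine_location (field : List (List Int)) : List Int := mineGoA field 0

-- ===== PORT B =====
-- the 'while idx >= len(field[r])' walk over the rows, carrying idx and r
def mineWalk : List (List Int) → Nat → Int → List Int
  | [], idx, r => [r, (idx : Int)]        -- unreachable: idx < total length of remaining rows
  | row :: rest, idx, r =>
    if idx ≥ row.length then mineWalk rest (idx - row.length) (r + 1)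
    else [r, (idx : Int)]

def mine_location_alt (field : List (List Int)) : List Int :=
  match PySem.List.index? (field.flatMap (fun row => row)) (1 : Int) with
  | none => []
  | some idx => mineWalk field idx 0

-- ===== PRECONDITION & SPEC =====
def Spec_mine_location (field : List (List Int)) (out : List Int) : Prop := out = mine_location_alt field
instance (field : List (List Int)) (out : List Int) : Decidable (Spec_mine_location field out) := by unfold Spec_mine_location; infer_instance

-- ===== CLAIM (what is proved, stated in full; the proofs are below) =====
def Claim_equal_mine_location : Prop := ∀ (field : List (List Int)), Dom_mine_location field → Spec_mine_location field (mine_location field)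

-- ===== LEMMAS AND PROOFS =====

lemma pvIndex?_append_of_not_mem (l t : List Int) (v : Int) (h : v ∉ l) :
    PySem.List.index? (l ++ t) v = (PySem.List.index? t v).map (· + l.length) := by
  induction l with
  | nil => simp
  | cons x xs ih =>
    simp only [List.mem_cons, not_or] at h
    rw [List.cons_append, PySem.List.index?_cons_of_ne _ (Ne.symm h.1), ih h.2]
    cases PySem.List.index? t v <;> simp [Nat.add_assoc]

lemma pvIndex?_lt_length (l : List Int) (v : Int) (k : Nat)
    (h : PySem.List.index? l v = some k) : k < l.length := by
  obtain ⟨hk, _⟩ := PySem.List.getElem_of_index?_eq_some h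
  exact hk

-- main invariant: A's loop from row index i equals B's walk started at i
lemma mineGoA_eq_walk (rows : List (List Int)) (i : Int) :
    mineGoA rows i =
      (match PySem.List.index? (rows.flatMap (fun row => row)) (1 : Int) with
        | none => []
        | some idx => mineWalk rows idx i) := by
  induction rows generalizing i with
  | nil => simp [mineGoA]
  | cons r rest ih =>
    by_cases hmem : (1 : Int) ∈ r
    · have hk : ∃ k, PySem.List.index? r (1 : Int) = some k := by
        have := (PySem.List.index?_isSome_iff (xs := r) (v := (1 : Int))).mpr hmem
        exact Option.isSome_iff_exists.mp this
      obtain ⟨k, hk⟩ := hk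
      have hlt : k < r.length := pvIndex?_lt_length r 1 k hk
      have hflat : List.idxOf? (1 : Int) (r ++ rest.flatten) = some k := by
        have h2 := PySem.List.index?_append_of_mem (rest.flatten) hmem
        rw [PySem.List.index?_eq_idxOf?, PySem.List.index?_eq_idxOf?] at h2
        rw [h2, ← PySem.List.index?_eq_idxOf?, hk]
      rw [PySem.List.index?_eq_idxOf?] at hk
      simp [mineGoA, hmem, hk, hflat, mineWalk, Nat.not_le.mpr hlt]
    · have hflat : PySem.List.index? ((r :: rest).flatMap (fun row => row)) (1 : Int) =
          (PySem.List.index? (rest.flatMap (fun row => row)) (1 : Int)).map (· + r.length) := by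
        rw [List.flatMap_cons]
        exact pvIndex?_append_of_not_mem r _ 1 hmem
      rw [show mineGoA (r :: rest) i = mineGoA rest (i + 1) by simp [mineGoA, hmem]]
      rw [ih (i + 1), hflat]
      cases PySem.List.index? (rest.flatMap (fun row => row)) (1 : Int) with
      | none => rfl
      | some m =>
        simp only [Option.map_some]
        rw [show mineWalk (r :: rest) (m + r.length) i
              = mineWalk rest (m + r.length - r.length) (i + 1) by
            simp [mineWalk]]
        simp

-- ===== VERDICT (by name: the statement is the Claim_ definition above) =====
theorem mine_location_spec : Claim_equal_mine_location := by
  intro field _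
  show mine_location field = mine_location_alt field
  rw [mine_location, mineGoA_eq_walk]
  rfl
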